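-- pv_equiv track=rewrite | github.com/femke888/contract-tester | src/contract_tester/traffic.py | _parse_curl_headers
-- ===== SOURCE A (Python) =====
-- from typing import Dict, List, Optional, Tuple, Union
--
-- def _parse_curl_headers(tokens: List[str]) -> Tuple[Dict, Optional[str]]:
--     headers: Dict[str, str] = {}
--     i = 0
--     while i < len(tokens):
--         tok = tokens[i]
--         if tok in {"-H", "--header"} and i + 1 < len(tokens):
--             raw = tokens[i + 1]
--             if ":" in raw:
--                 name, value = raw.split(":", 1)
--                 name = name.strip().lower()
--                 if name:
--                     headers[name] = value.strip()
--             i += 2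
--             continue
--         i += 1
--     return headers, headers.get("content-type")
-- ===== SOURCE B (Python) =====
-- def _raw_headers(tokens):
--     # stage 1: walk an iterator; each flag consumes the next item as its argument
--     raws = []
--     it = iter(tokens)
--     for tok in it:
--         if tok in ("-H", "--header"):
--             raw = next(it, None)
--             if raw is not None:
--                 raws.append(raw)
--     return raws
--
-- def _parse_curl_headers(tokens):
--     # stage 2: parse the consumed tokens into (name, value) pairs
--     pairs = []
--     for raw in _raw_headers(tokens):
--         if ":" in raw:
--             name, value = raw.split(":", 1)
--             name = name.strip().lower()
--             if name:
--                 pairs.append((name, value.strip()))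
--     # stage 3: build the dict at once (later duplicates overwrite, first position kept)
--     headers = dict(pairs)
--     return headers, headers.get("content-type")
-- ===== Notes on version B (the rewrite author's own statement) =====
-- stated objective: alternative
-- what changed: Replaces A's single index-stepping while loop that extracts, parses and stores headers in one pass by three stages: an iterator walk extracting the consumed header tokens (each flag pulls the next item via next()), a separate pass parsing them into a (name, value) pair list, and the dict built at once via dict(pairs).
import Mathlib
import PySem

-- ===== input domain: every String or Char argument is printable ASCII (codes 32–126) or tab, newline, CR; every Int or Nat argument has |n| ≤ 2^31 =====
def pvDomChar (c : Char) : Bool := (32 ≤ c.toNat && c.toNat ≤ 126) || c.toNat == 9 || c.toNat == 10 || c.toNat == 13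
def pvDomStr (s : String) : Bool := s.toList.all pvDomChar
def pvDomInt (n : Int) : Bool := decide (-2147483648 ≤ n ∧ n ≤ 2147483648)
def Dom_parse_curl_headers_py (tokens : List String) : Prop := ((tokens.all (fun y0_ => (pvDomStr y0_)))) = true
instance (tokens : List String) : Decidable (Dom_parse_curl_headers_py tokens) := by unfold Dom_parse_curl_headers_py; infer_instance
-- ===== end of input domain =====

-- B replaces A's single index-stepping while loop (which extracts, parses and stores in
-- one pass) by three stages: a an iterator-based extraction of the consumed header tokens, a pass
-- parsing them into a pair list, and a dict built at once from the pairs; same results.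

-- ===== PORT A =====
-- body of A's `if ":" in raw:` block
def pvProcessA (raw : String) (headers : PySem.Dict String String) : PySem.Dict String String :=
  if PySem.Str.isIn ":" raw then
    match PySem.Str.splitMax? raw ":" 1 with
    | some [name, value] =>
        let name := PySem.Str.lower (PySem.Str.strip name)
        if name ≠ "" then headers.insert name (PySem.Str.strip value) else headers
    | _ => headers
  else headers

-- A's while loop: `i += 2, continue` when a flag with a following token is seen, else `i += 1`
def pvLoopA : List String → PySem.Dict String String → PySem.Dict String String
  | [], headers => headers
  | [_], headers => headers
  | tok :: raw :: rest, headers =>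
      if tok == "-H" || tok == "--header" then pvLoopA rest (pvProcessA raw headers)
      else pvLoopA (raw :: rest) headers

def parse_curl_headers_py (tokens : List String) : (List (String × String)) × Option String :=
  let headers := pvLoopA tokens PySem.Dict.empty
  (headers.items, headers.get? "content-type")

-- ===== PORT B =====
-- Source B's _raw_headers: iterator walk where a flag consumes the next item as its argument
-- (the iterator-and-next(it, None) loop is ported by hand as this recursion; exact)
def pvRawHeaders : List String → List String
  | [] => []
  | tok :: rest =>
      if tok == "-H" || tok == "--header" then
        match rest with
        | [] => []                       -- next(it, None) = None: nothing appended, loop ends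
        | raw :: rest' => raw :: pvRawHeaders rest'
      else pvRawHeaders rest

-- the body of Source B's parsing loop: the (0 or 1) pairs contributed by one raw token
def pvParsePair (raw : String) : List (String × String) :=
  if PySem.Str.isIn ":" raw then
    match PySem.Str.splitMax? raw ":" 1 with
    | some [name, value] =>
        let name := PySem.Str.lower (PySem.Str.strip name)
        if name ≠ "" then [(name, PySem.Str.strip value)] else []
    | _ => []
  else []

def parse_curl_headers_py_alt (tokens : List String) : (List (String × String)) × Option String :=
  let pairs := (pvRawHeaders tokens).foldl (fun acc raw => acc ++ pvParsePair raw) []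
  let headers := PySem.Dict.ofList pairs   -- dict(pairs)
  (headers.items, headers.get? "content-type")

-- ===== PRECONDITION & SPEC =====
def Spec_parse_curl_headers_py (tokens : List String) (out : (List (String × String)) × Option String) : Prop := out = parse_curl_headers_py_alt tokens
instance (tokens : List String) (out : (List (String × String)) × Option String) : Decidable (Spec_parse_curl_headers_py tokens out) := by unfold Spec_parse_curl_headers_py; infer_instance

-- ===== CLAIM (what is proved, stated in full; the proofs are below) =====
def Claim_equal_parse_curl_headers_py : Prop := ∀ (tokens : List String), Dom_parse_curl_headers_py tokens → Spec_parse_curl_headers_py tokens (parse_curl_headers_py tokens)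

-- ===== LEMMAS AND PROOFS =====

-- A's inline processing of one raw token is the dict-update by its parsed pairs
lemma pvProcess_eq_update (raw : String) (h : PySem.Dict String String) :
    pvProcessA raw h = h.update (pvParsePair raw) := by
  unfold pvProcessA pvParsePair
  split
  · split
    · dsimp only; split_ifs <;> simp [PySem.Dict.update]
    · simp [PySem.Dict.update]
  · simp [PySem.Dict.update]

lemma pvUpdate_append (d : PySem.Dict String String) (ps qs : List (String × String)) :
    d.update (ps ++ qs) = (d.update ps).update qs := by
  simp [PySem.Dict.update, List.foldl_append]

-- folding A's processing over a list of raw tokens = one update by all parsed pairs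
lemma pvFold_process (rs : List String) (h : PySem.Dict String String) :
    rs.foldl (fun h raw => pvProcessA raw h) h = h.update (rs.flatMap pvParsePair) := by
  induction rs generalizing h with
  | nil => simp [PySem.Dict.update]
  | cons r rs ih =>
      rw [List.foldl_cons, pvProcess_eq_update, ih, List.flatMap_cons, pvUpdate_append]

-- A's while loop processes exactly the tokens that B's recursive extraction collects
lemma pvLoop_eq_fold (ts : List String) (h : PySem.Dict String String) :
    pvLoopA ts h = (pvRawHeaders ts).foldl (fun h raw => pvProcessA raw h) h := by
  induction ts, h using pvLoopA.induct with
  | case1 h => simp [pvLoopA, pvRawHeaders]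
  | case2 t h => simp only [pvLoopA, pvRawHeaders]; split <;> rfl
  | case3 tok raw rest h hflag ih =>
      simp [pvLoopA, pvRawHeaders, hflag, ih]
  | case4 tok raw rest h hflag ih =>
      simp only [pvLoopA, pvRawHeaders, hflag, Bool.false_eq_true, if_false, ih]

-- B's pair-accumulating loop is the flatMap of the per-token parses
lemma pvPairs_eq_flatMap (rs : List String) :
    rs.foldl (fun acc raw => acc ++ pvParsePair raw) [] = rs.flatMap pvParsePair := by
  simpa using (PySem.List.foldl_append_eq_flatMap (l := rs) (g := pvParsePair) (acc := []))

-- ===== VERDICT (by name: the statement is the Claim_ definition above) =====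
theorem parse_curl_headers_py_spec : Claim_equal_parse_curl_headers_py := by
  intro tokens _
  unfold Spec_parse_curl_headers_py parse_curl_headers_py parse_curl_headers_py_alt
  rw [pvLoop_eq_fold, pvFold_process, pvPairs_eq_flatMap]
  rfl
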